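-- pv_equiv track=rewrite | github.com/vcastrop/Taller01-Arquitectura | algoritmos/fcfs2.py | fcfs2
-- ===== SOURCE A (Python) =====
-- def fcfs2(start, requests):
--     seek_sequence = []
--     total = 0
--     current = start
--     for req in requests:
--         seek_sequence.append(req)
--         total += abs(req - current)
--         current = req
--     return seek_sequence, total
-- ===== SOURCE B (Python) =====
-- def fcfs2(start, requests):
--     reqs = list(requests)
--     path = [start] + reqs
--     def seg(lo, hi):
--         # total |adjacent difference| over path[lo..hi], divide and conquer
--         if hi - lo < 1:
--             return 0
--         if hi - lo == 1:
--             return abs(path[hi] - path[lo])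
--         mid = (lo + hi) // 2
--         return seg(lo, mid) + seg(mid, hi)
--     return reqs, seg(0, len(path) - 1)
-- ===== Notes on version B (the rewrite author's own statement) =====
-- stated objective: alternative
-- what changed: Replaces A's single linear pass threading a 'current' accumulator with a divide-and-conquer recursion: the head path [start]+requests is split at the midpoint and the total |adjacent difference| of each half-segment is computed recursively and added (correct because total movement over a path is additive over segments sharing a boundary point); the seek sequence is just list(requests).
import Mathlib
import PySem

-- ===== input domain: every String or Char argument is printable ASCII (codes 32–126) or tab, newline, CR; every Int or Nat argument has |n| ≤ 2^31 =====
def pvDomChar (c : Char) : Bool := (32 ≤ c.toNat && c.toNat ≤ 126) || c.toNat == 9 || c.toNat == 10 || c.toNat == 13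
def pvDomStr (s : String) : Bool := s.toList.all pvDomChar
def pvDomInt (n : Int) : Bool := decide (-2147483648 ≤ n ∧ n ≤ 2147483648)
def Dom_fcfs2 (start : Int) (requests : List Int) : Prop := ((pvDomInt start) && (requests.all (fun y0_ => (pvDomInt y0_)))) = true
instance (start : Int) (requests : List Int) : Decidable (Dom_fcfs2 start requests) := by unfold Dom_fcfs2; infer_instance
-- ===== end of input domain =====

-- B computes the total head movement by divide-and-conquer over the path [start]+requests instead of A's linear accumulator pass; objective: alternative, same cost.


-- ===== PORT A =====
-- Literal port of A: a fold threading (seek_sequence, total, current).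
def fcfs2 (start : Int) (requests : List Int) : List Int × Int :=
  let r := requests.foldl
    (fun (st : List Int × Int × Int) req =>
      (st.1 ++ [req], st.2.1 + |req - st.2.2|, req))
    ([], 0, start)
  (r.1, r.2.1)

-- ===== PORT B =====
-- Port of B's helper seg: divide-and-conquer total |adjacent difference| over path[lo..hi].
-- Python's path[i] here is always a valid non-negative in-range index, so List.getD is exact.
def fcfs2Seg (path : List Int) (lo hi : Nat) : Int :=
  if hi - lo < 1 then 0
  else if hi - lo = 1 then |path.getD hi 0 - path.getD lo 0|
  else
    let mid := (lo + hi) / 2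
    fcfs2Seg path lo mid + fcfs2Seg path mid hi
termination_by hi - lo
decreasing_by all_goals omega

def fcfs2_alt (start : Int) (requests : List Int) : List Int × Int :=
  let path := start :: requests
  (requests, fcfs2Seg path 0 (path.length - 1))

-- ===== PRECONDITION & SPEC =====
def Spec_fcfs2 (start : Int) (requests : List Int) (out : List Int × Int) : Prop := out = fcfs2_alt start requests
instance (start : Int) (requests : List Int) (out : List Int × Int) : Decidable (Spec_fcfs2 start requests out) := by unfold Spec_fcfs2; infer_instance

-- ===== CLAIM (what is proved, stated in full; the proofs are below) =====
def Claim_equal_fcfs2 : Prop := ∀ (start : Int) (requests : List Int), Dom_fcfs2 start requests → Spec_fcfs2 start requests (fcfs2 start requests)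

-- ===== LEMMAS AND PROOFS =====

-- Index-window sum of |adjacent differences| of path over [lo, hi): the common specification.
def fcfs2Adj (path : List Int) (lo hi : Nat) : Int :=
  ((List.range (hi - lo)).map (fun k => |path.getD (lo + k + 1) 0 - path.getD (lo + k) 0|)).sum

theorem fcfs2Adj_split (path : List Int) (lo mid hi : Nat) (h1 : lo ≤ mid) (h2 : mid ≤ hi) :
    fcfs2Adj path lo hi = fcfs2Adj path lo mid + fcfs2Adj path mid hi := by
  unfold fcfs2Adj
  have h : hi - lo = (mid - lo) + (hi - mid) := by omega
  rw [h, List.range_add, List.map_append, List.sum_append, List.map_map]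
  refine congrArg₂ (· + ·) rfl ?_
  exact congrArg List.sum (List.map_congr_left (fun k _ => by
    simp only [Function.comp_apply]
    have e2 : lo + (mid - lo + k) = mid + k := by omega
    rw [e2]))

theorem fcfs2Seg_eq_adj (path : List Int) : ∀ n lo hi, hi - lo = n →
    fcfs2Seg path lo hi = fcfs2Adj path lo hi := by
  intro n
  induction n using Nat.strong_induction_on with
  | _ n ih =>
    intro lo hi hn
    unfold fcfs2Seg
    split_ifs with h0 h1
    · unfold fcfs2Adj
      have : hi - lo = 0 := by omega
      simp [this]
    · unfold fcfs2Adj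
      rw [h1]
      have : lo + 1 = hi := by omega
      simp [List.range_succ, this]
    · have hm1 : (lo + hi) / 2 - lo < n := by omega
      have hm2 : hi - (lo + hi) / 2 < n := by omega
      show fcfs2Seg path lo ((lo + hi) / 2) + fcfs2Seg path ((lo + hi) / 2) hi = fcfs2Adj path lo hi
      rw [ih _ hm1 lo _ rfl, ih _ hm2 _ hi rfl]
      exact (fcfs2Adj_split path lo _ hi (by omega) (by omega)).symm

-- Peeling the first adjacent pair off a window starting at 0.
theorem fcfs2Adj_cons (cur h : Int) (tl : List Int) :
    fcfs2Adj (cur :: h :: tl) 0 (tl.length + 1)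
      = |h - cur| + fcfs2Adj (h :: tl) 0 tl.length := by
  unfold fcfs2Adj
  simp only [Nat.sub_zero, Nat.zero_add]
  rw [List.range_succ_eq_map, List.map_cons, List.sum_cons, List.map_map]
  refine congrArg₂ (· + ·) (by simp) ?_
  exact congrArg List.sum
    (List.map_congr_left (fun k _ => by simp [Function.comp]))

-- Loop invariant for A's fold: it appends the requests and adds the window sum of the extended path.
theorem fcfs2_inv (reqs : List Int) : ∀ (acc : List Int) (t cur : Int),
    reqs.foldl (fun (st : List Int × Int × Int) req =>
      (st.1 ++ [req], st.2.1 + |req - st.2.2|, req)) (acc, t, cur)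
    = (acc ++ reqs, t + fcfs2Adj (cur :: reqs) 0 reqs.length, reqs.getLastD cur) := by
  induction reqs with
  | nil =>
    intro acc t cur
    simp [fcfs2Adj]
  | cons h tl ih =>
    intro acc t cur
    simp only [List.foldl_cons, ih, List.length_cons]
    rw [fcfs2Adj_cons]
    refine Prod.ext (by simp) (Prod.ext ?_ ?_)
    · simp; ring
    · cases tl with
      | nil => simp
      | cons a as => simp [List.getLast?_eq_some_getLast]

theorem fcfs2_spec : Claim_equal_fcfs2 := by
  intro start requests _
  unfold Spec_fcfs2 fcfs2 fcfs2_alt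
  simp only [fcfs2_inv, List.nil_append, List.length_cons, Nat.add_sub_cancel]
  rw [fcfs2Seg_eq_adj (start :: requests) (requests.length - 0) 0 requests.length (by omega)]
  simp
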